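-- pv_equiv track=rewrite | github.com/myh00001/Cinebot | ws2812b.py | encode_ws2812_data
-- ===== SOURCE A (Python) =====
-- WS2812B_BIT_PATTERNS = {
--     0: [1, 0, 0],  # "0"
--     1: [1, 1, 0],  # "1"
-- }
--
-- def encode_ws2812_byte(byte):
--     """把一个 8bit 数据转为 SPI 比特流"""
--     bits = []
--     for i in range(8):
--         bit_val = (byte >> (7 - i)) & 1
--         bits.extend(WS2812B_BIT_PATTERNS[bit_val])
--     return bits
--
-- def encode_ws2812_data(rgb_data):
--     """rgb_data = [(R,G,B), ...]"""
--     spi_bits = []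
--     for (r, g, b) in rgb_data:
--         # WS2812B 使用 GRB 顺序
--         for val in (g, r, b):
--             spi_bits.extend(encode_ws2812_byte(val))
--     # 转成字节数组
--     spi_bytes = []
--     for i in range(0, len(spi_bits), 8):
--         byte = 0
--         for j in range(8):
--             if i + j < len(spi_bits):
--                 byte = (byte << 1) | spi_bits[i+j]
--         spi_bytes.append(byte)
--     return spi_bytes
-- ===== SOURCE B (Python) =====
-- _WS2812B_TABLE = []
-- for _v in range(256):
--     _acc = 0
--     for _i in range(7, -1, -1):
--         _acc = (_acc << 3) | (0b110 if (_v >> _i) & 1 else 0b100)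
--     _WS2812B_TABLE.append([(_acc >> 16) & 0xFF, (_acc >> 8) & 0xFF, _acc & 0xFF])
--
-- def encode_ws2812_data(rgb_data):
--     """rgb_data = [(R,G,B), ...] -> WS2812B SPI byte stream via a 256-entry lookup table."""
--     out = []
--     for (r, g, b) in rgb_data:
--         for val in (g, r, b):
--             out += _WS2812B_TABLE[val & 0xFF]
--     return out
-- ===== Notes on version B (the rewrite author's own statement) =====
-- stated objective: faster
-- what changed: B precomputes a 256-entry lookup table mapping each byte value to its three WS2812B SPI output bytes, then emits table entries per colour byte directly, eliminating A's per-pixel 24-bit list construction and the separate bit-repacking pass.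
import Mathlib
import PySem

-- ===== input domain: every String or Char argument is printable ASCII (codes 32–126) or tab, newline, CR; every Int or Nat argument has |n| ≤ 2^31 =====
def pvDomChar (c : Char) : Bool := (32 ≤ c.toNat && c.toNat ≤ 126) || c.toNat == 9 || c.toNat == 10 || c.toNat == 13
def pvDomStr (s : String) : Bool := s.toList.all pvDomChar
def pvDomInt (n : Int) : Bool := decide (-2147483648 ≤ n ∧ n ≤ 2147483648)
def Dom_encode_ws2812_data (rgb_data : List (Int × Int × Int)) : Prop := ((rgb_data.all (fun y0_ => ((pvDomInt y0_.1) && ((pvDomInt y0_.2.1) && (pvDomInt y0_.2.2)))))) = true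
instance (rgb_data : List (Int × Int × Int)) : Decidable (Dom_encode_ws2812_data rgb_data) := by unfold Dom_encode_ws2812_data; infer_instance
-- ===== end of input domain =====

-- B replaces A's per-pixel 24-bit expansion + global repacking loop by a precomputed
-- 256-entry table of 3-byte expansions indexed per colour byte (objective: faster, constant factor).

-- ===== PORT A =====
def WS2812B_BIT_PATTERNS : PySem.Dict Int (List Int) :=
  (PySem.Dict.empty.insert 0 [1, 0, 0]).insert 1 [1, 1, 0]

def encode_ws2812_byte (byte : Int) : List Int :=
  (PySem.List.pyRange 0 8 1).foldl (fun bits i =>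
    let bit_val := PySem.Int.band (byte >>> (7 - i).toNat) 1
    bits ++ (WS2812B_BIT_PATTERNS.get? bit_val).getD []) []

def encode_ws2812_data (rgb_data : List (Int × Int × Int)) : List Int :=
  let spi_bits := rgb_data.foldl (fun spi_bits p =>
    [p.2.1, p.1, p.2.2].foldl (fun spi_bits val => spi_bits ++ encode_ws2812_byte val) spi_bits) []
  let spi_bytes := (PySem.List.pyRange 0 (spi_bits.length : Int) 8).foldl (fun spi_bytes i =>
    let byte := (PySem.List.pyRange 0 8 1).foldl (fun byte j =>
      if i + j < (spi_bits.length : Int) then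
        PySem.Int.bor (byte <<< 1) (PySem.List.pyGetD spi_bits (i + j) 0)
      else byte) 0
    spi_bytes ++ [byte]) []
  spi_bytes

-- ===== PORT B =====
def wsTable : List (List Int) :=
  (PySem.List.pyRange 0 256 1).foldl (fun table v =>
    let acc := (PySem.List.pyRange 7 (-1) (-1)).foldl (fun acc i =>
      PySem.Int.bor (acc <<< 3) (if PySem.Int.band (v >>> i.toNat) 1 ≠ 0 then 6 else 4)) 0
    table ++ [[PySem.Int.band (acc >>> 16) 255, PySem.Int.band (acc >>> 8) 255,
               PySem.Int.band acc 255]]) []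

def encode_ws2812_data_alt (rgb_data : List (Int × Int × Int)) : List Int :=
  rgb_data.foldl (fun out p =>
    [p.2.1, p.1, p.2.2].foldl (fun out val =>
      out ++ PySem.List.pyGetD wsTable (PySem.Int.band val 255) []) out) []

-- ===== PRECONDITION & SPEC =====
def Spec_encode_ws2812_data (rgb_data : List (Int × Int × Int)) (out : List Int) : Prop := out = encode_ws2812_data_alt rgb_data
instance (rgb_data : List (Int × Int × Int)) (out : List Int) : Decidable (Spec_encode_ws2812_data rgb_data out) := by unfold Spec_encode_ws2812_data; infer_instance

-- ===== CLAIM (what is proved, stated in full; the proofs are below) =====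
def Claim_equal_encode_ws2812_data : Prop := ∀ (rgb_data : List (Int × Int × Int)), Dom_encode_ws2812_data rgb_data → Spec_encode_ws2812_data rgb_data (encode_ws2812_data rgb_data)

-- ===== LEMMAS AND PROOFS =====

-- the byte A's packing loop builds starting at bit index i
def pvByteAt (bits : List Int) (i : Int) : Int :=
  (PySem.List.pyRange 0 8 1).foldl (fun byte j =>
    if i + j < (bits.length : Int) then
      PySem.Int.bor (byte <<< 1) (PySem.List.pyGetD bits (i + j) 0)
    else byte) 0

-- A's packing loop, abstracted over the bit list
def pvPack (bits : List Int) : List Int :=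
  (PySem.List.pyRange 0 (bits.length : Int) 8).foldl
    (fun spi_bytes i => spi_bytes ++ [pvByteAt bits i]) []

theorem nat_and255 (n : Nat) : n &&& 255 = n % 256 := by
  have := Nat.and_two_pow_sub_one_eq_mod n 8
  norm_num at this
  exact this

theorem band255_eq (v : Int) : PySem.Int.band v 255 = v % 256 := by
  unfold PySem.Int.band
  by_cases h : 0 ≤ v
  · rw [if_pos h, if_pos (by norm_num : (0:Int) ≤ 255)]
    rw [show (255:Int).toNat = 255 from rfl, nat_and255]
    omega
  · rw [if_neg h, if_pos (by norm_num : (0:Int) ≤ 255)]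
    rw [show (255:Int).toNat = 255 from rfl, Nat.and_comm, nat_and255]
    omega

theorem bit_mod256 (v : Int) (k : Nat) (hk : k < 8) :
    PySem.Int.band (v >>> k) 1 = PySem.Int.band ((v % 256) >>> k) 1 := by
  rw [PySem.Int.band_one, PySem.Int.band_one,
      PySem.Int.mod_eq_emod_of_pos (by norm_num : (0:Int) < 2),
      PySem.Int.mod_eq_emod_of_pos (by norm_num : (0:Int) < 2),
      Int.shiftRight_eq_div_pow, Int.shiftRight_eq_div_pow]
  interval_cases k <;> (norm_num; try omega)

theorem bit_mod256' (v i : Int) (h0 : 0 ≤ i) (h8 : i ≤ 7) :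
    PySem.Int.band (v >>> (((7 - i).toNat : Nat) : Int)) 1
      = PySem.Int.band ((v % 256) >>> (((7 - i).toNat : Nat) : Int)) 1 := by
  rw [Int.shiftRight_natCast_right, Int.shiftRight_natCast_right]
  exact bit_mod256 v (7 - i).toNat (by omega)

theorem enc_mod256 (v : Int) :
    encode_ws2812_byte v = encode_ws2812_byte (v % 256) := by
  simp only [encode_ws2812_byte,
    show PySem.List.pyRange 0 8 1 = [0,1,2,3,4,5,6,7] from by decide,
    List.foldl_cons, List.foldl_nil]
  rw [bit_mod256' v 0 (by norm_num) (by norm_num), bit_mod256' v 1 (by norm_num) (by norm_num),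
      bit_mod256' v 2 (by norm_num) (by norm_num), bit_mod256' v 3 (by norm_num) (by norm_num),
      bit_mod256' v 4 (by norm_num) (by norm_num), bit_mod256' v 5 (by norm_num) (by norm_num),
      bit_mod256' v 6 (by norm_num) (by norm_num), bit_mod256' v 7 (by norm_num) (by norm_num)]

theorem enc_len (v : Int) : (encode_ws2812_byte v).length = 24 := by
  simp only [encode_ws2812_byte,
    show PySem.List.pyRange 0 8 1 = [0,1,2,3,4,5,6,7] from by decide,
    List.foldl_cons, List.foldl_nil]
  have h : ∀ x : Int, ((WS2812B_BIT_PATTERNS.get? (PySem.Int.band x 1)).getD []).length = 3 := by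
    intro x
    rw [PySem.Int.band_one]
    have h2 := PySem.Int.mod_nonneg x (b := 2) (by norm_num)
    have h3 := PySem.Int.mod_lt x (b := 2) (by norm_num)
    interval_cases h : (PySem.Int.mod x 2) <;> decide
  simp [h]

theorem byteAt_left (c rest : List Int) (i : Int) (h0 : 0 ≤ i)
    (h8 : i + 8 ≤ (c.length : Int)) :
    pvByteAt (c ++ rest) i = pvByteAt c i := by
  unfold pvByteAt
  apply PySem.List.foldl_congr_mem'
  intro j hj acc
  have hj' := PySem.List.mem_pyRange_one.mp hj
  have hlen : ((c ++ rest).length : Int) = c.length + rest.length := by simp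
  rw [if_pos (by omega), if_pos (by omega)]
  rw [PySem.List.pyGetD_of_nonneg _ _ (by omega),
      PySem.List.pyGetD_of_nonneg _ _ (by omega),
      List.getD_append _ _ _ _ (by omega)]

theorem byteAt_shift (c rest : List Int) (hc : c.length = 24) (i : Int) (h0 : 0 ≤ i) :
    pvByteAt (c ++ rest) (24 + i) = pvByteAt rest i := by
  unfold pvByteAt
  apply PySem.List.foldl_congr_mem'
  intro j hj acc
  have hj' := PySem.List.mem_pyRange_one.mp hj
  have hlen : ((c ++ rest).length : Int) = 24 + rest.length := by simp [hc]
  by_cases h : i + j < (rest.length : Int)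
  · rw [if_pos (by omega), if_pos h]
    rw [PySem.List.pyGetD_of_nonneg _ _ (by omega),
        PySem.List.pyGetD_of_nonneg _ _ (by omega),
        List.getD_append_right _ _ _ _ (by omega), hc]
    have he : (24 + i + j).toNat - 24 = (i + j).toNat := by omega
    rw [he]
  · rw [if_neg (by omega), if_neg h]

theorem pack_append (c rest : List Int) (hc : c.length = 24) :
    pvPack (c ++ rest) = pvPack c ++ pvPack rest := by
  unfold pvPack
  rw [PySem.List.foldl_append_singleton_eq_map, PySem.List.foldl_append_singleton_eq_map,
      PySem.List.foldl_append_singleton_eq_map]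
  rw [PySem.List.pyRange_of_pos _ _ (by norm_num : (0:Int) < 8),
      PySem.List.pyRange_of_pos _ _ (by norm_num : (0:Int) < 8),
      PySem.List.pyRange_of_pos _ _ (by norm_num : (0:Int) < 8)]
  have hlen : ((c ++ rest).length : Int) = 24 + rest.length := by simp [hc]
  rw [hlen, hc]
  have h24 : (if (0:Int) < 24 + rest.length then ((24 + (rest.length:Int) - 0 + 8 - 1)/8).toNat else 0)
      = 3 + (if (0:Int) < rest.length then (((rest.length:Int) - 0 + 8 - 1)/8).toNat else 0) := by
    by_cases h : (0:Int) < rest.length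
    · rw [if_pos (by omega), if_pos h]
      omega
    · rw [if_pos (by omega), if_neg h, show ((rest.length:Int)) = 0 from by omega]
      decide
  have hcc : (if (0:Int) < ((24:Nat):Int) then ((((24:Nat):Int) - 0 + 8 - 1)/8).toNat else 0) = 3 := by
    rw [if_pos (by norm_num)]
    decide
  rw [h24, hcc, List.range_add, List.map_append, List.map_append]
  simp only [List.nil_append, List.map_map]
  congr 1
  · apply List.map_congr_left
    intro k hk
    have hk3 : k < 3 := List.mem_range.mp hk
    simp only [Function.comp]
    exact byteAt_left c rest _ (by positivity) (by rw [hc]; push_cast; omega)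
  · apply List.map_congr_left
    intro k hk
    simp only [Function.comp]
    have h1 : (0:Int) + 8 * (((3:Nat) + k : Nat) : Int) = 24 + (0 + 8 * (k:Int)) := by
      push_cast; ring
    rw [h1, byteAt_shift c rest hc _ (by positivity)]

theorem pack_flatMap (vals : List Int) :
    pvPack (vals.flatMap encode_ws2812_byte)
      = vals.flatMap (fun v => pvPack (encode_ws2812_byte v)) := by
  induction vals with
  | nil => rfl
  | cons v vs ih =>
      simp only [List.flatMap_cons]
      rw [pack_append _ _ (enc_len v), ih]

set_option maxRecDepth 40000 in
theorem table_correct :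
    (List.range 256).all (fun r =>
      pvPack (encode_ws2812_byte (r : Int)) == PySem.List.pyGetD wsTable (r : Int) []) = true := by
  decide

theorem table_lookup (r : Int) (h0 : 0 ≤ r) (h1 : r < 256) :
    pvPack (encode_ws2812_byte r) = PySem.List.pyGetD wsTable r [] := by
  have hm : r.toNat ∈ List.range 256 := List.mem_range.mpr (by omega)
  have := List.all_eq_true.mp table_correct _ hm
  have hr : ((r.toNat : Nat) : Int) = r := by omega
  rw [hr] at this
  exact eq_of_beq this

-- the g,r,b flattening both programs perform
theorem fold_grb (f : Int → List Int) (l : List (Int × Int × Int)) (init : List Int) :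
    l.foldl (fun s p => [p.2.1, p.1, p.2.2].foldl (fun s v => s ++ f v) s) init
      = init ++ (l.flatMap (fun p => [p.2.1, p.1, p.2.2])).flatMap f := by
  induction l generalizing init with
  | nil => simp
  | cons p ps ih =>
      simp only [List.foldl_cons, List.foldl_nil] at ih ⊢
      rw [ih]
      simp [List.flatMap_cons, List.append_assoc]

theorem a_eq_pack (rgb_data : List (Int × Int × Int)) :
    encode_ws2812_data rgb_data
      = pvPack ((rgb_data.flatMap (fun p => [p.2.1, p.1, p.2.2])).flatMap encode_ws2812_byte) := by
  show pvPack (rgb_data.foldl (fun spi_bits p =>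
    [p.2.1, p.1, p.2.2].foldl (fun spi_bits val => spi_bits ++ encode_ws2812_byte val) spi_bits) []) = _
  rw [fold_grb, List.nil_append]

theorem b_eq_flat (rgb_data : List (Int × Int × Int)) :
    encode_ws2812_data_alt rgb_data
      = (rgb_data.flatMap (fun p => [p.2.1, p.1, p.2.2])).flatMap
          (fun v => PySem.List.pyGetD wsTable (PySem.Int.band v 255) []) := by
  show rgb_data.foldl (fun out p =>
      [p.2.1, p.1, p.2.2].foldl (fun out val =>
        out ++ PySem.List.pyGetD wsTable (PySem.Int.band val 255) []) out) [] = _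
  rw [fold_grb, List.nil_append]

-- ===== VERDICT (by name: the statement is the Claim_ definition above) =====
theorem encode_ws2812_data_spec : Claim_equal_encode_ws2812_data := by
  intro rgb_data _
  unfold Spec_encode_ws2812_data
  rw [a_eq_pack, b_eq_flat, pack_flatMap]
  apply List.flatMap_congr
  intro v _
  rw [enc_mod256, band255_eq]
  exact table_lookup _ (Int.emod_nonneg v (by norm_num)) (by omega)
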